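-- pv_equiv track=rewrite | github.com/crucial-keydev/excelProj | functs.py | fitintobox
-- ===== SOURCE A (Python) =====
-- def fitintobox(spaces, a):
--     taken = len(a)
--     sure =[]
--     leftover = []
--     if taken > spaces:
--         words = a.split(" ")
--         lenght = 0
--         for i in words:
--             lenght = lenght + len(i)
--             if lenght < spaces:
--                 sure.append(i)
--             else:
--                 leftover.append(i)
--
--         return sure, leftover
--
--     else:
--         return a.split(" "), []
-- ===== SOURCE B (Python) =====
-- def fitintobox(spaces, a):
--     if len(a) > spaces:
--         words = a.split(" ")
--         k = len(words)
--         total = 0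
--         for i, w in enumerate(words):
--             total += len(w)
--             if total >= spaces:
--                 k = i
--                 break
--         return words[:k], words[k:]
--     else:
--         return a.split(" "), []
-- ===== Notes on version B (the rewrite author's own statement) =====
-- stated objective: simpler
-- what changed: Instead of distributing each word into two growing accumulator lists with a running length, B computes the single cutoff index k (first word whose cumulative length reaches spaces) and returns words[:k], words[k:].
import Mathlib
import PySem

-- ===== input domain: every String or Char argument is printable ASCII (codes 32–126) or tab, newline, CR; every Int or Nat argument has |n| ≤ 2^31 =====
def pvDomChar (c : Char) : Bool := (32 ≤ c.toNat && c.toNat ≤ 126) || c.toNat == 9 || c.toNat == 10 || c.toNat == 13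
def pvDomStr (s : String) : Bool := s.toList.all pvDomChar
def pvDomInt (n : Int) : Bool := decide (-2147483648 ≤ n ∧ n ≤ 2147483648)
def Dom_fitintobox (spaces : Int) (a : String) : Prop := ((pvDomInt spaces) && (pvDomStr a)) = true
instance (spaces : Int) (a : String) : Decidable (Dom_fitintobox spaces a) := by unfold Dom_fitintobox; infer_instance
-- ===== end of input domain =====

-- B replaces A's two accumulator lists by computing one cutoff index k and returning
-- words.take k / words.drop k (objective: simpler decomposition, same cost).

-- ===== PORT A =====
-- the for-loop of A: state (lenght, sure, leftover), appends as Python's list.append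
def fitintoboxLoop (spaces : Int) : List String → Int → List String → List String → List String × List String
  | [], _, sure, leftover => (sure, leftover)
  | i :: rest, lenght, sure, leftover =>
      let lenght' := lenght + PySem.Str.len i
      if lenght' < spaces then
        fitintoboxLoop spaces rest lenght' (sure ++ [i]) leftover
      else
        fitintoboxLoop spaces rest lenght' sure (leftover ++ [i])

def fitintobox (spaces : Int) (a : String) : List String × List String :=
  let taken := PySem.Str.len a
  if taken > spaces then
    let words := (PySem.Chars.splitOn a.toList " ".toList).map String.ofList
    fitintoboxLoop spaces words 0 [] []
  else
    ((PySem.Chars.splitOn a.toList " ".toList).map String.ofList, [])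

-- ===== PORT B =====
-- B's loop: index of the first word at which the cumulative length reaches spaces
-- (the enumerate/break loop of Source B; returns words.length when it never breaks)
def fitintoboxCut (spaces : Int) : List String → Int → Nat
  | [], _ => 0
  | w :: rest, total =>
      let total' := total + PySem.Str.len w
      if total' ≥ spaces then 0 else 1 + fitintoboxCut spaces rest total'

def fitintobox_alt (spaces : Int) (a : String) : List String × List String :=
  if PySem.Str.len a > spaces then
    let words := (PySem.Chars.splitOn a.toList " ".toList).map String.ofList
    let k := fitintoboxCut spaces words 0
    (words.take k, words.drop k)
  else
    ((PySem.Chars.splitOn a.toList " ".toList).map String.ofList, [])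

-- ===== PRECONDITION & SPEC =====
def Spec_fitintobox (spaces : Int) (a : String) (out : List String × List String) : Prop := out = fitintobox_alt spaces a
instance (spaces : Int) (a : String) (out : List String × List String) : Decidable (Spec_fitintobox spaces a out) := by unfold Spec_fitintobox; infer_instance

-- ===== CLAIM (what is proved, stated in full; the proofs are below) =====
def Claim_equal_fitintobox : Prop := ∀ (spaces : Int) (a : String), Dom_fitintobox spaces a → Spec_fitintobox spaces a (fitintobox spaces a)

-- ===== LEMMAS AND PROOFS =====

theorem strLen_nonneg (s : String) : 0 ≤ PySem.Str.len s := by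
  simp [PySem.Str.len]

-- once the running length has reached spaces, every remaining word goes to leftover
theorem fitintoboxLoop_ge (spaces : Int) (ws : List String) (len : Int)
    (sure leftover : List String) (h : spaces ≤ len) :
    fitintoboxLoop spaces ws len sure leftover = (sure, leftover ++ ws) := by
  induction ws generalizing len leftover with
  | nil => simp [fitintoboxLoop]
  | cons w rest ih =>
      have hw := strLen_nonneg w
      rw [fitintoboxLoop]
      rw [if_neg (by omega)]
      rw [ih (len + PySem.Str.len w) (leftover ++ [w]) (by omega)]
      simp

theorem fitintoboxLoop_eq_cut (spaces : Int) (ws : List String) (len : Int)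
    (sure leftover : List String) :
    fitintoboxLoop spaces ws len sure leftover
      = (sure ++ ws.take (fitintoboxCut spaces ws len),
         leftover ++ ws.drop (fitintoboxCut spaces ws len)) := by
  induction ws generalizing len sure leftover with
  | nil => simp [fitintoboxLoop, fitintoboxCut]
  | cons w rest ih =>
      by_cases h : len + PySem.Str.len w < spaces
      · rw [fitintoboxLoop]
        rw [if_pos h, ih (len + PySem.Str.len w) (sure ++ [w]) leftover]
        rw [fitintoboxCut]
        rw [if_neg (by omega), Nat.add_comm 1]
        simp
      · rw [fitintoboxLoop]
        rw [if_neg h]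
        rw [fitintoboxLoop_ge spaces rest (len + PySem.Str.len w) sure (leftover ++ [w]) (by omega)]
        rw [fitintoboxCut]
        rw [if_pos (by omega)]
        simp

-- ===== VERDICT (by name: the statement is the Claim_ definition above) =====
theorem fitintobox_spec : Claim_equal_fitintobox := by
  intro spaces a _
  unfold Spec_fitintobox fitintobox fitintobox_alt
  by_cases h : PySem.Str.len a > spaces
  · rw [if_pos h, if_pos h, fitintoboxLoop_eq_cut]
    simp
  · rw [if_neg h, if_neg h]
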